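-- pv_equiv track=rewrite | github.com/MartialBouyssou/LocalSearch | src/main.py | _is_version_newer
-- ===== SOURCE A (Python) =====
-- def _parse_semver(version: str) -> tuple[tuple[int, ...], tuple[str, ...]] | None:
--     """Parse a semver-like tag such as v3.0.0-beta.1."""
--     if not version:
--         return None
--
--     cleaned = version.strip().lstrip("vV")
--     if not cleaned:
--         return None
--
--     cleaned = cleaned.split("+", 1)[0]
--     core_part, sep, prerelease_part = cleaned.partition("-")
--
--     core_numbers: list[int] = []
--     for segment in core_part.split("."):
--         if not segment.isdigit():
--             return None
--         core_numbers.append(int(segment))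
--
--     prerelease_segments: tuple[str, ...] = ()
--     if sep:
--         prerelease_segments = tuple(s for s in prerelease_part.split(".") if s)
--
--     return tuple(core_numbers), prerelease_segments
--
-- def _compare_prerelease(left: tuple[str, ...], right: tuple[str, ...]) -> int:
--     """Compare semver prerelease segments."""
--     if not left and not right:
--         return 0
--     if not left:
--         return 1
--     if not right:
--         return -1
--
--     max_len = max(len(left), len(right))
--     for i in range(max_len):
--         if i >= len(left):
--             return -1
--         if i >= len(right):
--             return 1
--
--         l_seg = left[i]
--         r_seg = right[i]
--         if l_seg == r_seg:
--             continue
--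
--         l_is_num = l_seg.isdigit()
--         r_is_num = r_seg.isdigit()
--
--         if l_is_num and r_is_num:
--             l_num = int(l_seg)
--             r_num = int(r_seg)
--             if l_num < r_num:
--                 return -1
--             if l_num > r_num:
--                 return 1
--             continue
--
--         if l_is_num and not r_is_num:
--             return -1
--         if not l_is_num and r_is_num:
--             return 1
--
--         if l_seg < r_seg:
--             return -1
--         return 1
--
--     return 0
--
-- def _is_version_newer(candidate: str, current: str) -> bool:
--     """Return True when candidate tag is newer than current tag."""
--     parsed_candidate = _parse_semver(candidate)
--     parsed_current = _parse_semver(current)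
--     if not parsed_candidate or not parsed_current:
--         return False
--
--     candidate_core, candidate_pre = parsed_candidate
--     current_core, current_pre = parsed_current
--
--     max_len = max(len(candidate_core), len(current_core))
--     for i in range(max_len):
--         left = candidate_core[i] if i < len(candidate_core) else 0
--         right = current_core[i] if i < len(current_core) else 0
--         if left > right:
--             return True
--         if left < right:
--             return False
--
--     return _compare_prerelease(candidate_pre, current_pre) > 0
-- ===== SOURCE B (Python) =====
-- def _key(version):
--     """Parse a tag into one totally-ordered comparison key, or None if invalid."""
--     if not version:
--         return None
--     cleaned = version.strip().lstrip("vV")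
--     if not cleaned:
--         return None
--     core_part, _, pre_part = cleaned.split("+", 1)[0].partition("-")
--     segs = core_part.split(".")
--     if not all(s.isdigit() for s in segs):
--         return None
--     nums = [int(s) for s in segs]
--     while nums and nums[-1] == 0:          # trailing zeros never affect the order
--         nums.pop()
--     pre = [(0, int(s), "") if s.isdigit() else (1, 0, s) for s in pre_part.split(".") if s]
--     return tuple(nums), (1 if not pre else 0), tuple(pre)
--
--
-- def _is_version_newer(candidate: str, current: str) -> bool:
--     """Return True when candidate tag is newer than current tag."""
--     ck, uk = _key(candidate), _key(current)
--     return ck is not None and uk is not None and ck > uk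
-- ===== Notes on version B (the rewrite author's own statement) =====
-- stated objective: alternative
-- what changed: B replaces A's three hand-written comparison loops (zero-padded core loop, release/prerelease cases, segment-by-segment prerelease loop with -1/0/1 codes) by building one totally ordered key per tag (trailing-zero-stripped core tuple, release flag, encoded prerelease tuple) and comparing the two keys with Python's native tuple ordering.
import Mathlib
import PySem

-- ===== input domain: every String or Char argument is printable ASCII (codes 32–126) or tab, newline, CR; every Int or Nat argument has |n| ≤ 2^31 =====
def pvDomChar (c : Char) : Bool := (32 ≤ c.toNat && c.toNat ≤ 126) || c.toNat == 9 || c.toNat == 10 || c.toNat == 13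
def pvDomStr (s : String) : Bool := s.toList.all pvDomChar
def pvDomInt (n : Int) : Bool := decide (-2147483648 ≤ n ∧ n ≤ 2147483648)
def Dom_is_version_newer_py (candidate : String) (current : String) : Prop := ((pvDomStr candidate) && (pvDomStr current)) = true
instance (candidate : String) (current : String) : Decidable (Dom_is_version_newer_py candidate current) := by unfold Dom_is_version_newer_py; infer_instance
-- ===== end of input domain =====

-- B replaces A's three hand-written comparison loops by building one totally ordered key per
-- tag (trailing-zero-stripped core, release flag, encoded prerelease) and comparing keys
-- lexicographically (objective: alternative decomposition, same cost).


-- ===== PORT A =====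
-- exact port of s.partition("-"): (before, sep-present?, after); find gives the FIRST '-' or -1
def pyPartitionDash (s : List Char) : List Char × Bool × List Char :=
  let i := PySem.Chars.find s ['-']
  if i < 0 then (s, false, []) else (s.take i.toNat, true, s.drop (i.toNat + 1))

-- int(s) for a segment already checked with s.isdigit() (ofChars? is some there)
def pvDigitVal (s : List Char) : Int := (PySem.Int.ofChars? s).getD 0

-- the core_numbers loop of _parse_semver (early `return None` as Option)
def pvCoreNums : List (List Char) → Option (List Int)
  | [] => some []
  | s :: rest =>
    if PySem.Chars.strIsdigit s then (pvCoreNums rest).map (fun ns => pvDigitVal s :: ns)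
    else none

-- _parse_semver; `.lstrip("vV")` ported as dropWhile (PySem has no chars-lstrip);
-- split("+",1)[0] never indexes out of range (split results are nonempty), hence headD
def pvParseSemver (version : List Char) : Option (List Int × List (List Char)) :=
  if version.isEmpty then none else
  let cleaned := (PySem.Chars.strip version).dropWhile (fun c => c == 'v' || c == 'V')
  if cleaned.isEmpty then none else
  let cleaned2 := (PySem.Chars.splitOnMax cleaned ['+'] 1).headD []
  let p := pyPartitionDash cleaned2
  match pvCoreNums (PySem.Chars.splitOn p.1 ['.']) with
  | none => none
  | some core =>
    let pre := if p.2.1 then (PySem.Chars.splitOn p.2.2 ['.']).filter (fun s => !s.isEmpty) else []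
    some (core, pre)

-- the indexed loop of _compare_prerelease (i ≥ len tests become the [] cases)
def pvPreLoop : List (List Char) → List (List Char) → Int
  | [], [] => 0
  | [], _ :: _ => -1
  | _ :: _, [] => 1
  | l :: ls, r :: rs =>
    if l == r then pvPreLoop ls rs
    else
      let lnum := PySem.Chars.strIsdigit l
      let rnum := PySem.Chars.strIsdigit r
      if lnum && rnum then
        let ln := pvDigitVal l
        let rn := pvDigitVal r
        if ln < rn then -1 else if rn < ln then 1 else pvPreLoop ls rs
      else if lnum && !rnum then -1
      else if !lnum && rnum then 1
      else if PySem.Chars.strLt l r then -1 else 1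

def pvComparePre (left right : List (List Char)) : Int :=
  if left.isEmpty && right.isEmpty then 0
  else if left.isEmpty then 1
  else if right.isEmpty then -1
  else pvPreLoop left right

-- the zero-padded core loop of _is_version_newer (indexing with default 0)
def pvCoreLoop : List Int → List Int → Option Bool
  | [], [] => none
  | a :: as_, [] => if 0 < a then some true else if a < 0 then some false else pvCoreLoop as_ []
  | [], b :: bs => if b < 0 then some true else if 0 < b then some false else pvCoreLoop [] bs
  | a :: as_, b :: bs => if b < a then some true else if a < b then some false else pvCoreLoop as_ bs

def is_version_newer_py (candidate : String) (current : String) : Bool :=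
  match pvParseSemver candidate.toList, pvParseSemver current.toList with
  | some (cc, cp), some (uc, up) =>
    (match pvCoreLoop cc uc with
     | some b => b
     | none => decide (0 < pvComparePre cp up))
  | _, _ => false

-- ===== PORT B =====
-- the while-pop loop dropping trailing zeros
def pvPopZeros (l : List Int) : List Int :=
  if h : l.getLast? = some 0 then pvPopZeros l.dropLast else l  -- h justifies termination
termination_by l.length
decreasing_by
  cases l with
  | nil => simp at h
  | cons a t => simp [List.length_dropLast]

-- B's own ports of str.partition("-") and of int(s) on digit-only s (Source B repeats them too)
def pyPartitionDashB (s : List Char) : List Char × Bool × List Char :=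
  let i := PySem.Chars.find s ['-']
  if i < 0 then (s, false, []) else (s.take i.toNat, true, s.drop (i.toNat + 1))

def pvDigitValB (s : List Char) : Int := (PySem.Int.ofChars? s).getD 0

-- (0, int(s), "") if s.isdigit() else (1, 0, s)
def pvEnc (s : List Char) : Int × Int × List Char :=
  if PySem.Chars.strIsdigit s then (0, pvDigitValB s, []) else (1, 0, s)

-- _key: parse into the comparison key, None on an invalid tag
def pvKey (version : List Char) : Option (List Int × Int × List (Int × Int × List Char)) :=
  if version.isEmpty then none else
  let cleaned := (PySem.Chars.strip version).dropWhile (fun c => c == 'v' || c == 'V')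
  if cleaned.isEmpty then none else
  let p := pyPartitionDashB ((PySem.Chars.splitOnMax cleaned ['+'] 1).headD [])
  let segs := PySem.Chars.splitOn p.1 ['.']
  if !segs.all PySem.Chars.strIsdigit then none else
  let nums := segs.map pvDigitValB
  let pre := ((PySem.Chars.splitOn p.2.2 ['.']).filter (fun s => !s.isEmpty)).map pvEnc
  some (pvPopZeros nums, if pre.isEmpty then 1 else 0, pre)

-- Python's tuple ordering, as lexicographic Ordering combinators
def pvCmpInt (a b : Int) : Ordering := if a < b then .lt else if b < a then .gt else .eq

def pvCmpList {α : Type} (c : α → α → Ordering) : List α → List α → Ordering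
  | [], [] => .eq
  | [], _ :: _ => .lt
  | _ :: _, [] => .gt
  | x :: xs, y :: ys => (c x y).then (pvCmpList c xs ys)

def pvCmpStr (s t : List Char) : Ordering :=
  if s == t then .eq else if PySem.Chars.strLt s t then .lt else .gt

def pvCmpSeg (x y : Int × Int × List Char) : Ordering :=
  (pvCmpInt x.1 y.1).then ((pvCmpInt x.2.1 y.2.1).then (pvCmpStr x.2.2 y.2.2))

def pvCmpKey (a b : List Int × Int × List (Int × Int × List Char)) : Ordering :=
  (pvCmpList pvCmpInt a.1 b.1).then ((pvCmpInt a.2.1 b.2.1).then (pvCmpList pvCmpSeg a.2.2 b.2.2))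

-- ck is not None and uk is not None and ck > uk, as an Option chain
def is_version_newer_py_alt (candidate : String) (current : String) : Bool :=
  ((pvKey candidate.toList).bind fun ck =>
    (pvKey current.toList).map fun uk => pvCmpKey ck uk == .gt).getD false

-- ===== PRECONDITION & SPEC =====
def Spec_is_version_newer_py (candidate : String) (current : String) (out : Bool) : Prop := out = is_version_newer_py_alt candidate current
instance (candidate : String) (current : String) (out : Bool) : Decidable (Spec_is_version_newer_py candidate current out) := by unfold Spec_is_version_newer_py; infer_instance

-- ===== CLAIM (what is proved, stated in full; the proofs are below) =====
def Claim_equal_is_version_newer_py : Prop := ∀ (candidate : String) (current : String), Dom_is_version_newer_py candidate current → Spec_is_version_newer_py candidate current (is_version_newer_py candidate current)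

-- ===== LEMMAS AND PROOFS =====

-- B's copies coincide with A's helpers definitionally
lemma pvDigitValB_eq : pvDigitValB = pvDigitVal := rfl
lemma pyPartitionDashB_eq : pyPartitionDashB = pyPartitionDash := rfl

-- int(s) for digit-only s is a natural number
lemma pvDigitVal_nonneg (s : List Char) (h : PySem.Chars.strIsdigit s = true) :
    0 ≤ pvDigitVal s := by
  obtain ⟨c, cs, rfl⟩ : ∃ c cs, s = c :: cs := by
    cases s with
    | nil => simp [PySem.Chars.strIsdigit] at h
    | cons c cs => exact ⟨c, cs, rfl⟩
  simp only [PySem.Chars.strIsdigit, Bool.and_eq_true, List.all_eq_true] at h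
  have hnos : ∀ x ∈ c :: cs, PySem.Int.isIntSpace x = false := by
    intro x hx
    have hd := h.2 x hx
    by_contra hq
    rw [Bool.not_eq_false] at hq
    simp only [PySem.Int.isIntSpace, Bool.or_eq_true, decide_eq_true_eq] at hq
    rcases hq with ((((hq | hq) | hq) | hq) | hq) | hq <;> subst hq <;>
      exact absurd hd (by decide)
  have hdrop : ∀ (l : List Char), (∀ x ∈ l, PySem.Int.isIntSpace x = false) →
      l.dropWhile PySem.Int.isIntSpace = l := by
    intro l hl
    induction l with
    | nil => rfl
    | cons a t ih =>
      rw [List.dropWhile_cons_of_neg (by simp [hl a (by simp)])]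
  have hc : PySem.Chars.isdigit c = true := h.2 c (by simp)
  have hcm : c ≠ '-' := by rintro rfl; revert hc; decide
  have hcp : c ≠ '+' := by rintro rfl; revert hc; decide
  have aux : ∀ (o : Option ℕ),
      0 ≤ (Option.map (fun n : ℤ => n) (o.bind fun a => some ((a : ℤ)))).getD 0 := by
    intro o; cases o <;> simp
  unfold pvDigitVal PySem.Int.ofChars?
  rw [hdrop _ hnos]
  rw [hdrop _ (by intro x hx; exact hnos x (List.mem_reverse.mp hx))]
  rw [List.reverse_reverse]
  simp only []
  split
  · rename_i ds heq
    exfalso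
    injection heq with h1 h2
    exact hcm h1
  · rename_i ds heq
    exfalso
    injection heq with h1 h2
    exact hcp h1
  · exact aux _

-- the core_numbers loop, closed form
lemma pvCoreNums_eq (segs : List (List Char)) :
    pvCoreNums segs =
      if segs.all PySem.Chars.strIsdigit then some (segs.map pvDigitVal) else none := by
  induction segs with
  | nil => rfl
  | cons s rest ih =>
    simp only [pvCoreNums, ih, List.all_cons, List.map_cons]
    by_cases hs : PySem.Chars.strIsdigit s = true <;>
      by_cases hr : rest.all PySem.Chars.strIsdigit = true <;>
        simp [hs, hr]

-- trailing-zero stripping, reverse form, and its cons characterisation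
def pvStrip (l : List Int) : List Int := (l.reverse.dropWhile (fun z => z == 0)).reverse

lemma pvPopZeros_eq (l : List Int) : pvPopZeros l = pvStrip l := by
  induction l using List.reverseRecOn with
  | nil => unfold pvPopZeros; simp [pvStrip]
  | append_singleton xs x ih =>
    unfold pvPopZeros
    simp only [List.dropLast_concat]
    by_cases hx : x = 0
    · subst hx
      rw [dif_pos (by simp), ih]
      simp only [pvStrip, List.reverse_append, List.reverse_singleton, List.singleton_append]
      rw [List.dropWhile_cons_of_pos (by simp)]
    · rw [dif_neg (by simp [hx])]
      simp only [pvStrip, List.reverse_append, List.reverse_singleton, List.singleton_append]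
      rw [List.dropWhile_cons_of_neg (by simpa using hx)]
      simp

lemma pvStrip_nil : pvStrip ([] : List Int) = [] := by simp [pvStrip]

lemma pvStrip_cons (x : Int) (xs : List Int) :
    pvStrip (x :: xs) =
      if pvStrip xs = [] then (if x = 0 then [] else [x]) else x :: pvStrip xs := by
  simp only [pvStrip, List.reverse_cons, List.dropWhile_append]
  by_cases h : (List.dropWhile (fun z => z == 0) xs.reverse) = []
  · have h' : (xs.reverse.dropWhile (fun z => z == 0)).reverse = [] := by simp [h]
    by_cases hx : x = 0
    · subst hx
      rw [show List.dropWhile (fun z : Int => z == 0) [0] = [] from by decide]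
      simp [h]
    · rw [show List.dropWhile (fun z : Int => z == 0) [x] = [x] from
        List.dropWhile_cons_of_neg (by simpa using hx)]
      simp [h, hx]
  · have h' : ¬ ((xs.reverse.dropWhile (fun z => z == 0)).reverse = []) := by simpa using h
    simp [h, h', List.isEmpty_iff]

def pvOrdToOpt : Ordering → Option Bool
  | .gt => some true
  | .lt => some false
  | .eq => none

-- A's zero-padded loop equals lexicographic comparison of the stripped cores
lemma pvCoreLoop_eq (a b : List Int) :
    (∀ x ∈ a, 0 ≤ x) → (∀ x ∈ b, 0 ≤ x) →
    pvCoreLoop a b = pvOrdToOpt (pvCmpList pvCmpInt (pvStrip a) (pvStrip b)) := by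
  induction a, b using pvCoreLoop.induct with
  | case1 => intro _ _; simp [pvCoreLoop, pvStrip_nil, pvCmpList, pvOrdToOpt]
  | case2 a as_ h =>
    intro ha hb
    have hane : a ≠ 0 := by omega
    rw [pvStrip_cons, pvStrip_nil]
    by_cases hs : pvStrip as_ = [] <;>
      simp [pvCoreLoop, h, hane, hs, pvCmpList, pvOrdToOpt]
  | case3 a as_ h1 h2 =>
    intro ha hb
    exact absurd (ha a (by simp)) (by omega)
  | case4 a as_ h1 h2 ih =>
    intro ha hb
    have hz : a = 0 := by omega
    subst hz
    have hrec := ih (fun x hx => ha x (by simp [hx])) (by simp)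
    rw [pvStrip_nil] at hrec
    rw [pvStrip_cons, pvStrip_nil]
    rcases hs : pvStrip as_ with _ | ⟨y, ys⟩ <;>
      · rw [hs] at hrec
        simp [pvCoreLoop, hrec, pvCmpList, pvOrdToOpt]
  | case5 b bs h =>
    intro ha hb
    exact absurd (hb b (by simp)) (by omega)
  | case6 b bs h1 h2 =>
    intro ha hb
    have hbne : b ≠ 0 := by omega
    rw [pvStrip_cons, pvStrip_nil]
    by_cases hs : pvStrip bs = [] <;>
      simp [pvCoreLoop, h1, h2, hbne, hs, pvCmpList, pvOrdToOpt]
  | case7 b bs h1 h2 ih =>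
    intro ha hb
    have hz : b = 0 := by omega
    subst hz
    have hrec := ih (by simp) (fun x hx => hb x (by simp [hx]))
    rw [pvStrip_nil] at hrec ⊢
    rw [pvStrip_cons]
    rcases hs : pvStrip bs with _ | ⟨y, ys⟩ <;>
      · rw [hs] at hrec
        simp [pvCoreLoop, hrec, pvCmpList, pvOrdToOpt]
  | case8 a as_ b bs h =>
    intro ha hb
    have hb0 : 0 ≤ b := hb b (by simp)
    have hane : a ≠ 0 := by omega
    have hnab : ¬ a < b := by omega
    have hapos : 0 < a := by omega
    have hnaneg : ¬ a < 0 := by omega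
    rw [pvStrip_cons, pvStrip_cons]
    by_cases hsb : pvStrip bs = [] <;> by_cases hzb : b = 0 <;>
      by_cases hsa : pvStrip as_ = [] <;>
        simp [pvCoreLoop, h, hane, hsa, hsb, hzb, hnab, hapos, hnaneg, pvCmpList, pvOrdToOpt,
          pvCmpInt, Ordering.then]
  | case9 a as_ b bs h1 h2 =>
    intro ha hb
    have ha0 : 0 ≤ a := ha a (by simp)
    have hbne : b ≠ 0 := by omega
    have hbpos : 0 < b := by omega
    have hnbneg : ¬ b < 0 := by omega
    rw [pvStrip_cons, pvStrip_cons]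
    by_cases hsa : pvStrip as_ = [] <;> by_cases hza : a = 0 <;>
      by_cases hsb : pvStrip bs = [] <;>
        simp [pvCoreLoop, h1, h2, hbne, hbpos, hnbneg, hsa, hza, hsb, pvCmpList, pvOrdToOpt,
          pvCmpInt, Ordering.then]
  | case10 a as_ b bs h1 h2 ih =>
    intro ha hb
    have hab : a = b := by omega
    subst hab
    have hrec := ih (fun x hx => ha x (by simp [hx])) (fun x hx => hb x (by simp [hx]))
    rw [pvStrip_cons, pvStrip_cons]
    rcases hsa : pvStrip as_ with _ | ⟨y, ys⟩ <;> rcases hsb : pvStrip bs with _ | ⟨z, zs⟩ <;>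
      · rw [hsa, hsb] at hrec
        by_cases hz : a = 0 <;>
          simp [pvCoreLoop, hz, hrec, pvCmpList, pvOrdToOpt, pvCmpInt, Ordering.then]

lemma pvCmpSeg_self (x : Int × Int × List Char) : pvCmpSeg x x = .eq := by
  simp [pvCmpSeg, pvCmpInt, pvCmpStr, Ordering.then]

-- the prerelease loop equals lexicographic comparison of the encoded segments
lemma pvPreLoop_eq (l r : List (List Char)) :
    pvPreLoop l r =
      (match pvCmpList pvCmpSeg (l.map pvEnc) (r.map pvEnc) with
       | .gt => 1 | .lt => -1 | .eq => 0) := by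
  induction l, r using pvPreLoop.induct with
  | case1 => rfl
  | case2 => simp [pvPreLoop, pvCmpList]
  | case3 => simp [pvPreLoop, pvCmpList]
  | case4 l ls r rs heq ih =>
    have hlr : l = r := by simpa using heq
    subst hlr
    simp only [pvPreLoop, heq, if_true, List.map_cons, pvCmpList, pvCmpSeg_self,
      Ordering.eq_then, ih]
  | case5 l ls r rs hne lnum rnum hdig ln rn hlt =>
    have hdig' : (PySem.Chars.strIsdigit l && PySem.Chars.strIsdigit r) = true := hdig
    obtain ⟨hl, hr⟩ := Bool.and_eq_true _ _ |>.mp hdig'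
    have hlt' : pvDigitVal l < pvDigitVal r := hlt
    simp [pvPreLoop, hne, hl, hr, hlt', pvEnc, pvDigitValB_eq, pvCmpList, pvCmpSeg, pvCmpInt, Ordering.then]
  | case6 l ls r rs hne lnum rnum hdig ln rn hnlt hgt =>
    have hdig' : (PySem.Chars.strIsdigit l && PySem.Chars.strIsdigit r) = true := hdig
    obtain ⟨hl, hr⟩ := Bool.and_eq_true _ _ |>.mp hdig'
    have hnlt' : ¬ pvDigitVal l < pvDigitVal r := hnlt
    have hgt' : pvDigitVal r < pvDigitVal l := hgt
    simp [pvPreLoop, hne, hl, hr, hnlt', hgt', pvEnc, pvDigitValB_eq, pvCmpList, pvCmpSeg, pvCmpInt,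
      Ordering.then]
  | case7 l ls r rs hne lnum rnum hdig ln rn hnlt hngt ih =>
    have hdig' : (PySem.Chars.strIsdigit l && PySem.Chars.strIsdigit r) = true := hdig
    obtain ⟨hl, hr⟩ := Bool.and_eq_true _ _ |>.mp hdig'
    have hnlt' : ¬ pvDigitVal l < pvDigitVal r := hnlt
    have hngt' : ¬ pvDigitVal r < pvDigitVal l := hngt
    have hveq : pvDigitVal l = pvDigitVal r := by omega
    simp [pvPreLoop, hne, hl, hr, hveq, pvEnc, pvDigitValB_eq, pvCmpList, pvCmpSeg, pvCmpInt,
      pvCmpStr, Ordering.then, ih]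
  | case8 l ls r rs hne lnum rnum hnd hln =>
    have hln' : (PySem.Chars.strIsdigit l && !PySem.Chars.strIsdigit r) = true := hln
    obtain ⟨hl, hr0⟩ := Bool.and_eq_true _ _ |>.mp hln'
    have hr : PySem.Chars.strIsdigit r = false := by simpa using hr0
    simp [pvPreLoop, hne, hl, hr, pvEnc, pvDigitValB_eq, pvCmpList, pvCmpSeg, pvCmpInt, Ordering.then]
  | case9 l ls r rs hne lnum rnum hnd hnd2 hrn =>
    have hrn' : (!PySem.Chars.strIsdigit l && PySem.Chars.strIsdigit r) = true := hrn
    obtain ⟨hl0, hr⟩ := Bool.and_eq_true _ _ |>.mp hrn'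
    have hl : PySem.Chars.strIsdigit l = false := by simpa using hl0
    simp [pvPreLoop, hne, hl, hr, pvEnc, pvDigitValB_eq, pvCmpList, pvCmpSeg, pvCmpInt, Ordering.then]
  | case10 l ls r rs hne lnum rnum hnd hnd2 hnd3 hstrlt =>
    have hnd' : ¬ (PySem.Chars.strIsdigit l && PySem.Chars.strIsdigit r) = true := hnd
    have hnd2' : ¬ (PySem.Chars.strIsdigit l && !PySem.Chars.strIsdigit r) = true := hnd2
    have hnd3' : ¬ (!PySem.Chars.strIsdigit l && PySem.Chars.strIsdigit r) = true := hnd3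
    have hl : PySem.Chars.strIsdigit l = false := by
      cases hbl : PySem.Chars.strIsdigit l <;> cases hbr : PySem.Chars.strIsdigit r <;>
        simp_all
    have hr : PySem.Chars.strIsdigit r = false := by
      cases hbl : PySem.Chars.strIsdigit l <;> cases hbr : PySem.Chars.strIsdigit r <;>
        simp_all
    have hlr : (l == r) = false := by simpa using hne
    simp [pvPreLoop, hne, hstrlt, pvEnc, hl, hr, pvCmpList, pvCmpSeg,
      pvCmpInt, pvCmpStr, Ordering.then]
  | case11 l ls r rs hne lnum rnum hnd hnd2 hnd3 hnstrlt =>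
    have hnd' : ¬ (PySem.Chars.strIsdigit l && PySem.Chars.strIsdigit r) = true := hnd
    have hnd2' : ¬ (PySem.Chars.strIsdigit l && !PySem.Chars.strIsdigit r) = true := hnd2
    have hnd3' : ¬ (!PySem.Chars.strIsdigit l && PySem.Chars.strIsdigit r) = true := hnd3
    have hl : PySem.Chars.strIsdigit l = false := by
      cases hbl : PySem.Chars.strIsdigit l <;> cases hbr : PySem.Chars.strIsdigit r <;>
        simp_all
    have hr : PySem.Chars.strIsdigit r = false := by
      cases hbl : PySem.Chars.strIsdigit l <;> cases hbr : PySem.Chars.strIsdigit r <;>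
        simp_all
    have hlr : (l == r) = false := by simpa using hne
    simp [pvPreLoop, hne, hnstrlt, pvEnc, hl, hr, pvCmpList, pvCmpSeg,
      pvCmpInt, pvCmpStr, Ordering.then]

-- _compare_prerelease > 0 equals the (release-flag, encoded-segments) key comparison being GT
lemma pvComparePre_eq (cp up : List (List Char)) :
    decide (0 < pvComparePre cp up) =
      ((pvCmpInt (if cp = [] then 1 else 0) (if up = [] then 1 else 0)).then
        (pvCmpList pvCmpSeg (cp.map pvEnc) (up.map pvEnc)) == .gt) := by
  cases cp with
  | nil =>
    cases up with
    | nil => decide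
    | cons u us => simp [pvComparePre, pvCmpInt, Ordering.then]
  | cons c cs =>
    cases up with
    | nil => simp [pvComparePre, pvCmpInt, Ordering.then]
    | cons u us =>
      have helper : ∀ (o : Ordering),
          decide (0 < (match o with | .gt => (1 : Int) | .lt => -1 | .eq => 0)) =
            ((pvCmpInt 0 0).then o == .gt) := by
        intro o; cases o <;> decide
      simp only [pvComparePre, List.isEmpty_cons, Bool.false_and, Bool.false_eq_true, if_false,
        reduceCtorEq, List.map_cons]
      rw [pvPreLoop_eq]
      simp only [List.map_cons]
      exact helper _

lemma pyPartitionDash_snd_false (s : List Char) (h : (pyPartitionDash s).2.1 = false) :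
    (pyPartitionDash s).2.2 = [] := by
  unfold pyPartitionDash at h ⊢
  simp only [] at h ⊢
  by_cases hf : PySem.Chars.find s ['-'] < 0 <;> simp [hf] at h ⊢

-- relation between A's parse and B's key construction
lemma pvKey_eq (v : List Char) :
    pvKey v = (pvParseSemver v).map
      (fun pr => (pvPopZeros pr.1, if pr.2 = ([] : List (List Char)) then (1 : Int) else 0,
        pr.2.map pvEnc)) := by
  unfold pvKey pvParseSemver
  simp only [pvDigitValB_eq, pyPartitionDashB_eq]
  by_cases h0 : v.isEmpty = true
  · simp [h0]
  · simp only [h0, Bool.false_eq_true, if_false]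
    generalize (PySem.Chars.strip v).dropWhile (fun c => c == 'v' || c == 'V') = cleaned
    by_cases h1 : cleaned.isEmpty = true
    · simp [h1]
    · simp only [h1, Bool.false_eq_true, if_false]
      have hemp : (PySem.Chars.splitOn ([] : List Char) ['.']).filter
          (fun s => !s.isEmpty) = [] := by decide
      rw [pvCoreNums_eq]
      by_cases hall : (PySem.Chars.splitOn (pyPartitionDash ((PySem.Chars.splitOnMax cleaned ['+'] 1).headD [])).1 ['.']).all PySem.Chars.strIsdigit = true
      · simp only [hall, Bool.not_true, Bool.false_eq_true, if_false, if_true]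
        by_cases hsep : (pyPartitionDash ((PySem.Chars.splitOnMax cleaned ['+'] 1).headD [])).2.1 = true
        · simp only [hsep, if_true]
          by_cases hpe : ((PySem.Chars.splitOn (pyPartitionDash ((PySem.Chars.splitOnMax cleaned ['+'] 1).headD [])).2.2 ['.']).filter (fun s => !s.isEmpty)) = []
          · simp only [hpe, List.map_nil, List.isEmpty_nil, if_true]
            rfl
          · have hne : (((PySem.Chars.splitOn (pyPartitionDash ((PySem.Chars.splitOnMax cleaned ['+'] 1).headD [])).2.2 ['.']).filter (fun s => !s.isEmpty)).map pvEnc).isEmpty = false := by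
              cases hq : ((PySem.Chars.splitOn (pyPartitionDash ((PySem.Chars.splitOnMax cleaned ['+'] 1).headD [])).2.2 ['.']).filter (fun s => !s.isEmpty)).map pvEnc with
              | nil => exact absurd (List.map_eq_nil_iff.mp hq) hpe
              | cons a t => rfl
            simp only [hne, Bool.false_eq_true, if_false, Option.map_some]
            rw [if_neg hpe]
        · have hsep' : (pyPartitionDash ((PySem.Chars.splitOnMax cleaned ['+'] 1).headD [])).2.1 = false := by simpa using hsep
          have hp2 : (pyPartitionDash ((PySem.Chars.splitOnMax cleaned ['+'] 1).headD [])).2.2 = [] := pyPartitionDash_snd_false _ hsep'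
          simp only [hsep', Bool.false_eq_true, if_false, hp2, hemp, List.map_nil,
            List.isEmpty_nil, if_true]
          rfl
      · have hall' : (PySem.Chars.splitOn (pyPartitionDash ((PySem.Chars.splitOnMax cleaned ['+'] 1).headD [])).1 ['.']).all PySem.Chars.strIsdigit = false := by simpa using hall
        simp only [hall', Bool.not_false, if_true, Bool.false_eq_true, if_false]
        rfl

-- elements of a parsed core are nonnegative
lemma pvParse_core_nonneg (v : List Char) (core : List Int) (pre : List (List Char))
    (h : pvParseSemver v = some (core, pre)) : ∀ x ∈ core, 0 ≤ x := by
  unfold pvParseSemver at h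
  by_cases h0 : v.isEmpty = true
  · simp [h0] at h
  · simp only [h0, Bool.false_eq_true, if_false] at h
    by_cases h1 : ((PySem.Chars.strip v).dropWhile (fun c => c == 'v' || c == 'V')).isEmpty = true
    · simp [h1] at h
    · simp only [h1, Bool.false_eq_true, if_false] at h
      rw [pvCoreNums_eq] at h
      set segs := PySem.Chars.splitOn
        (pyPartitionDash ((PySem.Chars.splitOnMax
          ((PySem.Chars.strip v).dropWhile (fun c => c == 'v' || c == 'V')) ['+'] 1).headD [])).1
        ['.'] with hsegs
      by_cases hall : segs.all PySem.Chars.strIsdigit = true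
      · simp only [hall, if_true] at h
        have hcore : core = segs.map pvDigitVal := by
          cases h; rfl
        subst hcore
        intro x hx
        rcases List.mem_map.mp hx with ⟨s, hs, rfl⟩
        exact pvDigitVal_nonneg s (List.all_eq_true.mp hall s hs)
      · simp [hall] at h

-- ===== VERDICT (by name: the statement is the Claim_ definition above) =====
theorem is_version_newer_py_spec : Claim_equal_is_version_newer_py := by
  intro candidate current _
  unfold Spec_is_version_newer_py
  unfold is_version_newer_py is_version_newer_py_alt
  rw [pvKey_eq, pvKey_eq]
  cases hc : pvParseSemver candidate.toList with
  | none => rfl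
  | some pc =>
    cases hu : pvParseSemver current.toList with
    | none => rfl
    | some pu =>
      obtain ⟨cc, cp⟩ := pc
      obtain ⟨uc, up⟩ := pu
      simp only [Option.map_some, Option.bind_some, Option.getD_some]
      unfold pvCmpKey
      rw [pvCoreLoop_eq cc uc (pvParse_core_nonneg _ _ _ hc) (pvParse_core_nonneg _ _ _ hu)]
      rw [pvPopZeros_eq, pvPopZeros_eq]
      cases hcm : pvCmpList pvCmpInt (pvStrip cc) (pvStrip uc) with
      | gt => simp [pvOrdToOpt, Ordering.then]
      | lt => simp [pvOrdToOpt, Ordering.then]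
      | eq =>
        simp only [pvOrdToOpt, Ordering.eq_then]
        exact pvComparePre_eq cp up
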